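-- pv_equiv track=rewrite | github.com/AbhishekKolakkal/sdeInterviewThings | intermidiateProblems2.py | specialSubSequenceAG
-- ===== SOURCE A (Python) =====
-- def specialSubSequenceAG(A):
--     '''
--     approach using prefix sum
--     1. when using prefux sum, let's do this for an example
--         ABCGAG -> We will be doing a right prefix [0, 0, 0, 0, 0, 0]
--         I encountered a G so the array will be [0, 0, 0, 0, 0, 1]
--         I encounteres a G so the array will be [0, 0, 0, 2, 0, 1]
--         I can also do this array in this way [2, 2, 2, 2, 1, 1]
--         this is the prefix summ array
--         now, I need to find in the array if i come across A and at that index what is the number and add the number to the result array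
--
--     '''
--     result = 0
--     rightPrefixArr = [0 for i in range(0, len(A))]
--     rightPrefixArr[len(rightPrefixArr) -1] = 1 if A[len(A) - 1] == "G" else 0
--
--     for i in range(len(A) - 2, -1, -1):
--         if A[i] == "G":
--             rightPrefixArr[i] = rightPrefixArr[i + 1] + 1
--         else:
--             rightPrefixArr[i] = rightPrefixArr[i + 1]
--
--     i = 0
--     for i in range(0, len(A)):
--         if A[i] == "A":
--             result = rightPrefixArr[i] + result
--     return result
-- ===== SOURCE B (Python) =====
-- def specialSubSequenceAG(A):
--     g = 0
--     result = 0
--     for ch in reversed(A):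
--         if ch == "G":
--             g += 1
--         elif ch == "A":
--             result += g
--     return result
-- ===== Notes on version B (the rewrite author's own statement) =====
-- stated objective: simpler
-- what changed: Replaces the build-a-right-prefix-array-then-sum two-pass with a single right-to-left pass keeping one running count of G's and adding it at each A; no prefix array is allocated or indexed (constant-factor win: one pass, no list construction).
-- outside the precondition, e.g. on specialSubSequenceAG(''): A raises IndexError, B returns 0
import Mathlib
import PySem

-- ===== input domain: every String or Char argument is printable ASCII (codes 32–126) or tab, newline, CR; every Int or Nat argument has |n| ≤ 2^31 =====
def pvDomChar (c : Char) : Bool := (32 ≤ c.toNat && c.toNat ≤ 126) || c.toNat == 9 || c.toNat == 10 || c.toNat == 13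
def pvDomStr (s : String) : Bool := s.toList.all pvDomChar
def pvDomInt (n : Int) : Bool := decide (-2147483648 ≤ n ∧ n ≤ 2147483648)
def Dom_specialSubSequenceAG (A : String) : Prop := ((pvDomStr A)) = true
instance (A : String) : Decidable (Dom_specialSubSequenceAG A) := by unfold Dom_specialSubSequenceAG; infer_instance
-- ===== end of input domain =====

-- B drops A's right-prefix array for a single right-to-left pass with one running G-counter (simpler, O(1) extra space); A raises IndexError on "" where B returns 0, excluded by Pre_.

-- ===== PORT A =====
-- string indexing A[i] is ported as cs.getD i ' ': exact for the in-range indices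
-- every loop of A uses (all indices lie in 0..n-1; the n = 0 case is outside Pre_).
def specialSubSequenceAG (A : String) : Int :=
  let cs := A.toList
  let n := cs.length
  let rightPrefixArr : List Int := List.replicate n 0
  let rightPrefixArr := rightPrefixArr.set (rightPrefixArr.length - 1)
      (if cs.getD (n - 1) ' ' = 'G' then 1 else 0)
  let rightPrefixArr := (PySem.List.pyRange ((n : Int) - 2) (-1) (-1)).foldl
      (fun arr i =>
        if cs.getD i.toNat ' ' = 'G' then
          arr.set i.toNat (arr.getD (i.toNat + 1) 0 + 1)
        else
          arr.set i.toNat (arr.getD (i.toNat + 1) 0)) rightPrefixArr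
  (PySem.List.pyRange 0 (n : Int) 1).foldl
      (fun result i =>
        if cs.getD i.toNat ' ' = 'A' then rightPrefixArr.getD i.toNat 0 + result
        else result) 0

-- ===== PORT B =====
def specialSubSequenceAG_alt (A : String) : Int :=
  (A.toList.reverse.foldl
    (fun (p : Int × Int) ch =>
      if ch = 'G' then (p.1 + 1, p.2)
      else if ch = 'A' then (p.1, p.2 + p.1)
      else p) ((0 : Int), (0 : Int))).2

-- ===== PRECONDITION & SPEC =====
-- Pre_ excludes exactly the empty string, on which A raises IndexError.
def Pre_specialSubSequenceAG (A : String) : Prop := A ≠ ""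
instance (A : String) : Decidable (Pre_specialSubSequenceAG A) := by
  unfold Pre_specialSubSequenceAG; infer_instance
def pvWitness_specialSubSequenceAG : String := "GAGXAG"

def Spec_specialSubSequenceAG (A : String) (out : Int) : Prop := out = specialSubSequenceAG_alt A
instance (A : String) (out : Int) : Decidable (Spec_specialSubSequenceAG A out) := by
  unfold Spec_specialSubSequenceAG; infer_instance

-- ===== CLAIM (what is proved, stated in full; the proofs are below) =====
def Claim_equal_specialSubSequenceAG : Prop := ∀ (A : String), Dom_specialSubSequenceAG A → Pre_specialSubSequenceAG A → Spec_specialSubSequenceAG A (specialSubSequenceAG A)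

-- ===== LEMMAS AND PROOFS =====

/-- number of 'G' characters in a list -/
def gcountAG : List Char → Int
  | [] => 0
  | c :: t => (if c = 'G' then 1 else 0) + gcountAG t

/-- number of 'A' characters in a list -/
def acountAG : List Char → Int
  | [] => 0
  | c :: t => (if c = 'A' then 1 else 0) + acountAG t

/-- the mathematical value both programs compute: sum over each 'A' of G's after it -/
def specSAG : List Char → Int
  | [] => 0
  | c :: t => (if c = 'A' then gcountAG t else 0) + specSAG t

theorem foldrB_eq (cs : List Char) (g r : Int) :
    cs.foldr (fun ch (p : Int × Int) =>
      if ch = 'G' then (p.1 + 1, p.2)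
      else if ch = 'A' then (p.1, p.2 + p.1)
      else p) (g, r)
    = (g + gcountAG cs, r + specSAG cs + g * acountAG cs) := by
  induction cs with
  | nil => simp [gcountAG, specSAG, acountAG]
  | cons c t ih =>
    rw [List.foldr_cons, ih]
    rcases eq_or_ne c 'G' with hG | hG
    · have hA : c ≠ 'A' := by subst hG; decide
      simp only [gcountAG, specSAG, acountAG, if_pos hG, if_neg hA, Prod.mk.injEq]
      exact ⟨by ring, by ring⟩
    · rcases eq_or_ne c 'A' with hA | hA
      · simp only [gcountAG, specSAG, acountAG, if_pos hA, if_neg hG, Prod.mk.injEq]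
        exact ⟨by ring, by ring⟩
      · simp only [gcountAG, specSAG, acountAG, if_neg hA, if_neg hG, Prod.mk.injEq]
        exact ⟨by ring, by ring⟩

theorem alt_eq_specS (A : String) :
    specialSubSequenceAG_alt A = specSAG A.toList := by
  unfold specialSubSequenceAG_alt
  rw [List.foldl_reverse]
  rw [foldrB_eq]
  ring

theorem gcount_drop (cs : List Char) (m : Nat) (hm : m < cs.length) :
    gcountAG (cs.drop m) = (if cs.getD m ' ' = 'G' then 1 else 0) + gcountAG (cs.drop (m + 1)) := by
  rw [List.getD_eq_getElem cs ' ' hm, ← List.getElem_cons_drop hm]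
  simp [gcountAG]

theorem fill_loop (cs : List Char) :
    ∀ (m : Nat), m ≤ cs.length →
    ∀ arr : List Int, arr.length = cs.length →
    (∀ j : Nat, m ≤ j → arr.getD j 0 = gcountAG (cs.drop j)) →
    ∀ j : Nat,
      ((PySem.List.pyRange ((m : Int) - 1) (-1) (-1)).foldl
        (fun arr i =>
          if cs.getD i.toNat ' ' = 'G' then
            arr.set i.toNat (arr.getD (i.toNat + 1) 0 + 1)
          else
            arr.set i.toNat (arr.getD (i.toNat + 1) 0)) arr).getD j 0
      = gcountAG (cs.drop j) := by
  intro m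
  induction m with
  | zero =>
    intro _ arr _ hinv j
    rw [PySem.List.pyRange_neg_one_eq_nil (by norm_num)]
    exact hinv j (Nat.zero_le j)
  | succ m ih =>
    intro hm arr hlen hinv j
    have hcons : PySem.List.pyRange ((↑(m + 1) : Int) - 1) (-1) (-1)
        = ((m : Int)) :: PySem.List.pyRange ((m : Int) - 1) (-1) (-1) := by
      have := PySem.List.pyRange_neg_one_cons (a := ((m + 1 : Nat) : Int) - 1) (b := -1)
        (by push_cast; omega)
      simpa using this
    rw [hcons]
    simp only [List.foldl_cons]
    set step := fun (arr : List Int) (i : Int) =>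
        if cs.getD i.toNat ' ' = 'G' then
          arr.set i.toNat (arr.getD (i.toNat + 1) 0 + 1)
        else
          arr.set i.toNat (arr.getD (i.toNat + 1) 0) with hstep
    -- the new array after the step at index m
    have hmlt : m < cs.length := hm
    have hnext : arr.getD (m + 1) 0 = gcountAG (cs.drop (m + 1)) :=
      hinv (m + 1) (le_refl _)
    have hval : gcountAG (cs.drop m)
        = (if cs.getD m ' ' = 'G' then 1 else 0) + gcountAG (cs.drop (m + 1)) :=
      gcount_drop cs m hmlt
    have hlen' : (step arr (m : Int)).length = cs.length := by
      simp [hstep]; split_ifs <;> simp [hlen]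
    have hinv' : ∀ j : Nat, m ≤ j → (step arr (m : Int)).getD j 0 = gcountAG (cs.drop j) := by
      intro j hj
      by_cases hje : j = m
      · subst hje
        have hjl : j < arr.length := by rw [hlen]; exact hmlt
        have hset : ∀ v : Int, (arr.set j v).getD j 0 = v := by
          intro v
          rw [List.getD_eq_getElem?_getD, List.getElem?_set_self (by simpa using hjl)]
          rfl
        simp only [hstep, Int.toNat_natCast]
        split_ifs with hG
        · rw [hset, hnext, hval, if_pos hG]; ring
        · rw [hset, hnext, hval, if_neg hG]; ring
      · have hne2 : j ≠ m := hje
        have hstepj : (step arr (m : Int)).getD j 0 = arr.getD j 0 := by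
          simp only [hstep, Int.toNat_natCast]
          split_ifs <;>
            rw [List.getD_eq_getElem?_getD, List.getElem?_set_ne (by omega),
                List.getD_eq_getElem?_getD]
        rw [hstepj]; exact hinv j (by omega)
    exact ih (by omega) (step arr (m : Int)) hlen' hinv' j

theorem sum_range_spec (cs : List Char) :
    ((List.range cs.length).map
      (fun k : Nat => if cs.getD k ' ' = 'A' then gcountAG (cs.drop k) else 0)).sum
    = specSAG cs := by
  induction cs with
  | nil => simp [specSAG]
  | cons c t ih =>
    rw [List.length_cons, List.range_succ_eq_map, List.map_cons, List.map_map, List.sum_cons]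
    have hmap : ∀ k ∈ List.range t.length,
        ((fun k : Nat => if (c :: t).getD k ' ' = 'A' then gcountAG ((c :: t).drop k) else 0) ∘
          Nat.succ) k
        = (fun k : Nat => if t.getD k ' ' = 'A' then gcountAG (t.drop k) else 0) k := by
      intro k _
      simp
    rw [List.map_congr_left hmap, ih]
    rcases eq_or_ne c 'A' with hA | hA
    · have hG : c ≠ 'G' := by subst hA; decide
      simp [specSAG, gcountAG, hA]
    · simp [specSAG, hA]

theorem sum_loop (cs : List Char) (arr : List Int)
    (harr : ∀ j : Nat, arr.getD j 0 = gcountAG (cs.drop j)) :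
    (PySem.List.pyRange 0 (cs.length : Int) 1).foldl
      (fun result i =>
        if cs.getD i.toNat ' ' = 'A' then arr.getD i.toNat 0 + result else result) 0
    = specSAG cs := by
  have hfun : (fun (result : Int) (i : Int) =>
        if cs.getD i.toNat ' ' = 'A' then arr.getD i.toNat 0 + result else result)
      = (fun (result : Int) (i : Int) =>
        result + (if cs.getD i.toNat ' ' = 'A' then gcountAG (cs.drop i.toNat) else 0)) := by
    funext r i
    rw [harr i.toNat]
    split_ifs <;> ring
  rw [hfun, PySem.List.foldl_add, PySem.List.pyRange_one]
  simp only [Int.sub_zero, Int.toNat_natCast, List.map_map, zero_add]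
  have hmap : ∀ k ∈ List.range cs.length,
      ((fun i : Int => if cs.getD i.toNat ' ' = 'A' then gcountAG (cs.drop i.toNat) else 0) ∘
        (fun k : Nat => (↑k : Int))) k
      = (fun k : Nat => if cs.getD k ' ' = 'A' then gcountAG (cs.drop k) else 0) k := by
    intro k _
    simp
  rw [List.map_congr_left hmap, sum_range_spec]

theorem portA_eq (A : String) (hne : A.toList ≠ []) :
    specialSubSequenceAG A = specSAG A.toList := by
  simp only [specialSubSequenceAG]
  set cs := A.toList with hcs
  have hn : 1 ≤ cs.length := List.length_pos_of_ne_nil hne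
  set n := cs.length with hnd
  set arr1 : List Int := (List.replicate n (0 : Int)).set ((List.replicate n (0 : Int)).length - 1)
      (if cs.getD (n - 1) ' ' = 'G' then 1 else 0) with harr1
  have hlen1 : arr1.length = n := by simp [harr1]
  have hinv1 : ∀ j : Nat, n - 1 ≤ j → arr1.getD j 0 = gcountAG (cs.drop j) := by
    intro j hj
    rcases eq_or_ne j (n - 1) with hje | hje
    · subst hje
      have hjl : n - 1 < (List.replicate n (0 : Int)).length := by simp; omega
      rw [harr1]
      simp only [List.length_replicate]
      rw [List.getD_eq_getElem?_getD, List.getElem?_set_self (by simpa using hjl)]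
      rw [gcount_drop cs (n - 1) (by omega)]
      have hdrop : cs.drop (n - 1 + 1) = [] := by
        apply List.drop_eq_nil_of_le; omega
      rw [hdrop]
      simp [gcountAG]
    · have hj2 : n ≤ j := by omega
      have h1 : arr1.getD j 0 = 0 := by
        apply List.getD_eq_default
        rw [hlen1]; omega
      have h2 : cs.drop j = [] := by apply List.drop_eq_nil_of_le; omega
      rw [h1, h2]; rfl
  have hb : (n : Int) - 2 = ((n - 1 : Nat) : Int) - 1 := by omega
  rw [hb]
  rw [sum_loop cs _ (fill_loop cs (n - 1) (by omega) arr1 hlen1 hinv1)]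

-- ===== VERDICT (by name: the statement is the Claim_ definition above) =====
theorem specialSubSequenceAG_spec : Claim_equal_specialSubSequenceAG := by
  intro A _ hpre
  unfold Spec_specialSubSequenceAG
  have hne : A.toList ≠ [] := by
    intro h
    apply hpre
    rwa [String.toList_eq_nil_iff] at h
  rw [alt_eq_specS, portA_eq A hne]
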